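-- pv_equiv track=rewrite | github.com/StarsExpress/LeetCode-Repository | docs/prefix_sum/2025_hard/partitions_count.py | count_max_partitions
-- ===== SOURCE A (Python) =====
-- def count_max_partitions(nums: list[int], k: int) -> int:  # LeetCode Q.2025.
--     total_sum = sum(nums)
--
--     # Key: diff = prefix sum - suffix sum.
--     left_diff_counts: dict[int, int] = dict()
--     right_diff_counts: dict[int, int] = dict()
--
--     # Default to natural value: leave entire array unchanged.
--     max_partition_ways = 0
--
--     prefix_sum = 0
--     for pivot_idx in range(1, len(nums)):
--         prefix_sum += nums[pivot_idx - 1]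
--         suffix_sum = total_sum - prefix_sum
--         diff = prefix_sum - suffix_sum
--
--         if diff not in right_diff_counts.keys():
--             right_diff_counts[diff] = 0
--         right_diff_counts[diff] += 1
--
--         # Born as a great partition. No need to change.
--         if prefix_sum == suffix_sum: max_partition_ways += 1
--
--     prefix_sum = 0  # Reset to let next for loop sweep again.
--
--     for idx, num in enumerate(nums):
--         prefix_sum += num
--
--         partition_ways = 0
--
--         # Change prefix side: replace num with k.
--         if idx < len(nums) - 1:  # Vector back num can't join prefix side.
--             partition_ways += right_diff_counts.get(num - k, 0)
--
--         # Change suffix side: replace num with k.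
--         if idx > 0:  # Vector front num can't join suffix side.
--             partition_ways += left_diff_counts.get(k - num, 0)
--
--         if partition_ways > max_partition_ways:
--             max_partition_ways = partition_ways
--
--         diff = 2 * prefix_sum - total_sum  # Prefix - suffix.
--         # For future indices, this diff is only available as left side.
--
--         if diff not in left_diff_counts.keys():
--             left_diff_counts[diff] = 0
--         left_diff_counts[diff] += 1
--
--         if diff in right_diff_counts.keys():
--             right_diff_counts[diff] -= 1
--
--     return max_partition_ways
-- ===== SOURCE B (Python) =====
-- def bisect_left(a: list[int], x: int) -> int:
--     lo = 0
--     hi = len(a)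
--     while lo < hi:
--         mid = (lo + hi) // 2
--         if a[mid] < x:
--             lo = mid + 1
--         else:
--             hi = mid
--     return lo
--
--
-- def count_max_partitions(nums: list[int], k: int) -> int:  # LeetCode Q.2025.
--     n = len(nums)
--     # ps[i] = sum of the first i elements.
--     ps = [0]
--     s = 0
--     for x in nums:
--         s += x
--         ps.append(s)
--     total = s
--     # diffs[t] = prefix sum minus suffix sum at pivot t + 1.
--     diffs = [2 * ps[i] - total for i in range(1, n)]
--     # Static index: diff value -> ascending list of positions t.
--     pos: dict[int, list[int]] = {}
--     for t, d in enumerate(diffs):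
--         pos.setdefault(d, []).append(t)
--     # Baseline: leave the array unchanged.
--     best = len(pos.get(0, []))
--     # Replacing nums[j] with k needs diff nums[j] - k on pivots > j (t >= j)
--     # and diff k - nums[j] on pivots <= j (t < j): count both by binary search.
--     for j in range(n):
--         num = nums[j]
--         r = pos.get(num - k, [])
--         l = pos.get(k - num, [])
--         ways = (len(r) - bisect_left(r, j)) + bisect_left(l, j)
--         best = max(best, ways)
--     return best
-- ===== Notes on version B (the rewrite author's own statement) =====
-- stated objective: alternative
-- what changed: Replaces A's single-pass sweep with two evolving hash maps of prefix-suffix differences by a direct recount: B builds a static prefix-sum table and diff list once, and for each replacement index simply counts matching diffs in the two slices around it, plus the unchanged baseline.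
import Mathlib
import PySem

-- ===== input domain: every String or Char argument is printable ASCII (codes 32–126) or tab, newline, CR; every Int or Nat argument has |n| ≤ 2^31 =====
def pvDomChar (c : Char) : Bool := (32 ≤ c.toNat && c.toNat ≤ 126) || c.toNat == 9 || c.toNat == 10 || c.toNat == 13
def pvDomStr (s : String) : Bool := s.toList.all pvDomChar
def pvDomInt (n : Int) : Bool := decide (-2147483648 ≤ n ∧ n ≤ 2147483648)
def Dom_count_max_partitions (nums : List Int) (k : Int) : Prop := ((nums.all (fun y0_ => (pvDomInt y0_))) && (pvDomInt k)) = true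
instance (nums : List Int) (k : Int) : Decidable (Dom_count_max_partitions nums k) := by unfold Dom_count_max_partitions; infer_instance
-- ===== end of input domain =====

-- B replaces A's one-pass sweep with two evolving hash maps of prefix-suffix differences by a
-- static index built once (diff value -> ascending pivot positions) queried with binary search
-- per replacement index (alternative decomposition; no claim about measured speed).

-- ===== PORT A =====
-- body of A's first for-loop (state: right_diff_counts, max_partition_ways, prefix_sum)
def pvAStep1 (nums : List Int) (total : Int)
    (st : PySem.Dict Int Int × Int × Int) (pivot_idx : Int) :
    PySem.Dict Int Int × Int × Int :=
  let pre := st.2.2 + PySem.List.pyGetD nums (pivot_idx - 1) 0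
  let suffix := total - pre
  let diff := pre - suffix
  let right := if st.1.contains diff then st.1 else st.1.insert diff 0
  let right := right.insert diff (right.getD diff 0 + 1)
  let maxw := if pre = suffix then st.2.1 + 1 else st.2.1
  (right, maxw, pre)

-- body of A's second for-loop (state: left_diff_counts, right_diff_counts, max_partition_ways, prefix_sum)
def pvAStep2 (k total n : Int)
    (st : PySem.Dict Int Int × PySem.Dict Int Int × Int × Int) (p : Int × Int) :
    PySem.Dict Int Int × PySem.Dict Int Int × Int × Int :=
  let idx := p.1
  let num := p.2
  let pre := st.2.2.2 + num
  let ways := (if idx < n - 1 then st.2.1.getD (num - k) 0 else 0)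
  let ways := ways + (if 0 < idx then st.1.getD (k - num) 0 else 0)
  let maxw := if st.2.2.1 < ways then ways else st.2.2.1
  let diff := 2 * pre - total
  let left := if st.1.contains diff then st.1 else st.1.insert diff 0
  let left := left.insert diff (left.getD diff 0 + 1)
  let right := if st.2.1.contains diff then st.2.1.insert diff (st.2.1.getD diff 0 - 1) else st.2.1
  (left, right, maxw, pre)

def count_max_partitions (nums : List Int) (k : Int) : Int :=
  let total := nums.sum
  let st1 := (PySem.List.pyRange 1 (nums.length : Int) 1).foldl
    (pvAStep1 nums total) (PySem.Dict.empty, 0, 0)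
  let st2 := (PySem.List.enumerate nums 0).foldl
    (pvAStep2 k total (nums.length : Int)) (PySem.Dict.empty, st1.1, st1.2.1, 0)
  st2.2.2.1

-- ===== PORT B =====
-- B's helper bisect_left (hand-written binary search on a sorted list)
def pvBisect (a : List Int) (x : Int) (lo hi : Int) : Int :=
  if h : lo < hi then
    let mid := PySem.Int.floordiv (lo + hi) 2
    if PySem.List.pyGetD a mid 0 < x then pvBisect a x (mid + 1) hi
    else pvBisect a x lo mid
  else lo
termination_by (hi - lo).toNat
decreasing_by
  · have hb := PySem.Int.floordiv_two_mid_bounds (le_of_lt h)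
    omega
  · have hlt : PySem.Int.floordiv (lo + hi) 2 < hi := by
      rw [PySem.Int.floordiv_lt_iff_lt_mul (by norm_num)]
      omega
    omega

-- body of B's prefix-sum-building loop (state: ps, s)
def pvBPrefix (st : List Int × Int) (x : Int) : List Int × Int :=
  (st.1 ++ [st.2 + x], st.2 + x)

def count_max_partitions_alt (nums : List Int) (k : Int) : Int :=
  let n : Int := (nums.length : Int)
  let st := nums.foldl pvBPrefix ([0], 0)
  let ps := st.1
  let total := st.2
  let diffs := (PySem.List.pyRange 1 n 1).map (fun i => 2 * PySem.List.pyGetD ps i 0 - total)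
  let pos := (PySem.List.enumerate diffs 0).foldl
    (fun acc p => acc.modify p.2 [] (· ++ [p.1]))
    (PySem.Dict.empty : PySem.Dict Int (List Int))
  let best := ((pos.getD 0 []).length : Int)
  (PySem.List.pyRange 0 n 1).foldl
    (fun best j =>
      let num := PySem.List.pyGetD nums j 0
      let r := pos.getD (num - k) []
      let l := pos.getD (k - num) []
      let ways := ((r.length : Int) - pvBisect r j 0 (r.length : Int))
          + pvBisect l j 0 (l.length : Int)
      max best ways) best

-- ===== PRECONDITION & SPEC =====
def Spec_count_max_partitions (nums : List Int) (k : Int) (out : Int) : Prop := out = count_max_partitions_alt nums k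
instance (nums : List Int) (k : Int) (out : Int) : Decidable (Spec_count_max_partitions nums k out) := by unfold Spec_count_max_partitions; infer_instance

-- ===== CLAIM (what is proved, stated in full; the proofs are below) =====
def Claim_equal_count_max_partitions : Prop := ∀ (nums : List Int) (k : Int), Dom_count_max_partitions nums k → Spec_count_max_partitions nums k (count_max_partitions nums k)

-- ===== LEMMAS AND PROOFS =====

-- Common mathematical description both ports are reduced to:
-- pvS i = prefix sum, pvD i = prefix-minus-suffix difference at pivot i,
-- pvCnt lo hi v = number of pivots i in [lo, hi) with pvD i = v,
-- pvWays j = balanced pivots after replacing nums[j] by k, pvRes = the program's answer.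
def pvS (nums : List Int) (i : Nat) : Int := (nums.take i).sum
theorem prefix_fold : ∀ (xs : List Int) (acc : List Int) (s : Int),
    xs.foldl pvBPrefix (acc, s) =
      (acc ++ (List.range xs.length).map (fun t => s + (xs.take (t + 1)).sum), s + xs.sum) := by
  intro xs
  induction xs with
  | nil => intro acc s; simp
  | cons x xs ih =>
    intro acc s
    simp only [List.foldl_cons, pvBPrefix]
    rw [ih]
    refine Prod.ext ?_ (by simp; ring)
    show acc ++ [s + x] ++ _ = acc ++ _
    rw [List.append_assoc]
    congr 1
    rw [List.length_cons, List.range_succ_eq_map, List.map_cons, List.map_map]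
    simp only [List.take_succ_cons, List.sum_cons, List.singleton_append, List.take_zero,
      List.sum_nil, Function.comp_def]
    congr 1
    · ring_nf
    · apply List.map_congr_left; intro t _; ring

theorem ps_eq (nums : List Int) :
    nums.foldl pvBPrefix ([0], 0) =
      ((List.range (nums.length + 1)).map (pvS nums), nums.sum) := by
  rw [prefix_fold]
  refine Prod.ext ?_ (by simp)
  show [0] ++ _ = _
  rw [List.range_succ_eq_map, List.map_cons, List.map_map]
  simp [pvS, Function.comp_def]
def pvD (nums : List Int) (i : Nat) : Int := 2 * pvS nums i - nums.sum
def pvCnt (nums : List Int) (lo hi : Nat) (v : Int) : Int :=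
  ((List.range (hi - lo)).countP (fun t => decide (pvD nums (lo + t) = v)) : Int)

theorem ps_get (nums : List Int) (i : Int) (h0 : 0 ≤ i) (h1 : i ≤ (nums.length : Int)) :
    PySem.List.pyGetD ((List.range (nums.length + 1)).map (pvS nums)) i 0 = pvS nums i.toNat := by
  rw [PySem.List.pyGetD_eq_getElem _ _ h0 (by simp; omega)]
  simp

-- count fold over pyRange 1 n 1 with a Prop-ite
def pvWays (nums : List Int) (k : Int) (j : Nat) : Int :=
  pvCnt nums (j + 1) nums.length (nums.getD j 0 - k) + pvCnt nums 1 (j + 1) (k - nums.getD j 0)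
def pvRes (nums : List Int) (k : Int) : Int :=
  (List.range nums.length).foldl (fun acc j => max acc (pvWays nums k j))
    (pvCnt nums 1 nums.length 0)

theorem ps_get' (nums : List Int) (t : Nat) (h1 : t + 1 ≤ nums.length) :
    PySem.List.pyGetD ((List.range (nums.length + 1)).map (pvS nums)) (1 + (t : Int)) 0
      = pvS nums (1 + t) := by
  have : (1 + (t : Int)) = ((1 + t : Nat) : Int) := by push_cast; ring
  rw [this, ps_get nums _ (by positivity) (by omega)]
  rfl

theorem diffs_eq (nums : List Int) :
    ((PySem.List.pyRange 1 (nums.length : Int) 1).map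
        (fun i => 2 * PySem.List.pyGetD ((List.range (nums.length + 1)).map (pvS nums)) i 0
          - nums.sum))
      = (List.range (nums.length - 1)).map (fun t => pvD nums (1 + t)) := by
  rw [PySem.List.pyRange_one, List.map_map,
    show (((nums.length : Int) - 1).toNat) = nums.length - 1 by omega]
  apply List.map_congr_left
  intro t ht
  rw [List.mem_range] at ht
  simp only [Function.comp_apply]
  rw [ps_get' nums t (by omega)]
  rfl

theorem pvCnt_nonneg (nums : List Int) (lo hi : Nat) (v : Int) : 0 ≤ pvCnt nums lo hi v := by
  exact Int.natCast_nonneg _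

theorem pvCnt_split (nums : List Int) {lo mid hi : Nat} (h1 : lo ≤ mid) (h2 : mid ≤ hi) (v : Int) :
    pvCnt nums lo hi v = pvCnt nums lo mid v + pvCnt nums mid hi v := by
  unfold pvCnt
  rw [show hi - lo = (mid - lo) + (hi - mid) by omega]
  rw [List.range_add, List.countP_append, List.countP_map]
  push_cast
  congr 2
  apply List.countP_congr
  intro t ht
  simp only [Function.comp_apply, decide_eq_true_eq]
  rw [show lo + (mid - lo + t) = mid + t by omega]

theorem pvCnt_empty (nums : List Int) {lo hi : Nat} (h : hi ≤ lo) (v : Int) :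
    pvCnt nums lo hi v = 0 := by
  unfold pvCnt
  rw [show hi - lo = 0 by omega]
  simp

theorem pvCnt_succ (nums : List Int) {lo hi : Nat} (h : lo ≤ hi) (v : Int) :
    pvCnt nums lo (hi + 1) v = pvCnt nums lo hi v + (if pvD nums hi = v then 1 else 0) := by
  rw [pvCnt_split nums h (Nat.le_succ hi) v]
  congr 1
  unfold pvCnt
  rw [show hi + 1 - hi = 1 by omega]
  simp [List.range_succ]

theorem pvS_succ (nums : List Int) {j : Nat} (h : j < nums.length) :
    pvS nums (j + 1) = pvS nums j + nums.getD j 0 := by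
  unfold pvS
  rw [List.sum_take_succ nums j h, List.getD_eq_getElem nums 0 h]

theorem countP_boundary (a : List Int) (p : Int → Bool) (c : Nat) (hc : c ≤ a.length)
    (h1 : ∀ (i : Nat) (h : i < a.length), i < c → p a[i] = true)
    (h2 : ∀ (i : Nat) (h : i < a.length), c ≤ i → p a[i] = false) :
    a.countP p = c := by
  conv_lhs => rw [← List.take_append_drop c a, List.countP_append]
  have htake : (a.take c).countP p = (a.take c).length := by
    rw [List.countP_eq_length]
    intro y hy
    obtain ⟨i, hi, hval⟩ := List.mem_iff_getElem.mp hy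
    have hlt : i < c ∧ i < a.length := by simpa using hi
    rw [List.getElem_take] at hval
    exact hval ▸ h1 i hlt.2 hlt.1
  have hdrop : (a.drop c).countP p = 0 := by
    rw [List.countP_eq_zero]
    intro y hy
    obtain ⟨i, hi, hval⟩ := List.mem_iff_getElem.mp hy
    have hi' : c + i < a.length := by simp at hi; omega
    rw [List.getElem_drop] at hval
    simp [← hval, h2 (c + i) hi' (by omega)]
  rw [htake, hdrop, List.length_take]
  omega

theorem pvBisect_run (a : List Int) (x : Int) (hs : a.Pairwise (· ≤ ·)) :
    ∀ (fuel : Nat) (lo hi : Int), (hi - lo).toNat ≤ fuel →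
      0 ≤ lo → lo ≤ hi → hi ≤ (a.length : Int) →
      (∀ i : Nat, (i : Int) < lo → ∀ h : i < a.length, a[i] < x) →
      (∀ i : Nat, hi ≤ (i : Int) → ∀ h : i < a.length, ¬ a[i] < x) →
      pvBisect a x lo hi = (a.countP (fun y => decide (y < x)) : Int) := by
  have hmono := List.pairwise_iff_getElem.mp hs
  intro fuel
  induction fuel with
  | zero =>
    intro lo hi hfuel h0 hlh hhl hlow hhigh
    have heq : lo = hi := by omega
    rw [pvBisect, dif_neg (by omega)]
    subst heq
    rw [countP_boundary a _ lo.toNat (by omega)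
      (fun i h hi => by simpa using hlow i (by omega) h)
      (fun i h hi => by simpa using hhigh i (by omega) h)]
    omega
  | succ fuel ih =>
    intro lo hi hfuel h0 hlh hhl hlow hhigh
    rw [pvBisect]
    by_cases h : lo < hi
    · rw [dif_pos h]
      have hb := PySem.Int.floordiv_two_mid_bounds (le_of_lt h)
      have hmidlt : PySem.Int.floordiv (lo + hi) 2 < hi := by
        rw [PySem.Int.floordiv_lt_iff_lt_mul (by norm_num)]
        omega
      set mid := PySem.Int.floordiv (lo + hi) 2 with hmid
      have hmrange : mid.toNat < a.length := by omega
      have hgetm : PySem.List.pyGetD a mid 0 = a[mid.toNat] :=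
        PySem.List.pyGetD_eq_getElem a 0 (by omega) (by omega)
      by_cases hcmp : PySem.List.pyGetD a mid 0 < x
      · rw [if_pos hcmp]
        refine ih (mid + 1) hi (by omega) (by omega) (by omega) (by omega) ?_ hhigh
        intro i hilt hlen
        have hxmid : a[mid.toNat] < x := by rw [← hgetm]; exact hcmp
        rcases Nat.lt_or_ge i mid.toNat with hh | hh
        · exact lt_of_le_of_lt (hmono i mid.toNat hlen hmrange hh) hxmid
        · have : i = mid.toNat := by omega
          subst this; exact hxmid
      · rw [if_neg hcmp]
        refine ih lo mid (by omega) (by omega) (by omega) (by omega) hlow ?_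
        intro i hge hlen
        have hxm : ¬ a[mid.toNat] < x := by rw [← hgetm]; exact hcmp
        rcases Nat.lt_or_ge mid.toNat i with hh | hh
        · have hle : a[mid.toNat] ≤ a[i] := hmono mid.toNat i hmrange hlen hh
          omega
        · have : i = mid.toNat := by omega
          subst this; exact hxm
    · rw [dif_neg h]
      have heq : lo = hi := by omega
      subst heq
      rw [countP_boundary a _ lo.toNat (by omega)
        (fun i hI hi => by simpa using hlow i (by omega) hI)
        (fun i hI hi => by simpa using hhigh i (by omega) hI)]
      omega

theorem pvBisect_spec (a : List Int) (x : Int) (hs : a.Pairwise (· ≤ ·)) :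
    pvBisect a x 0 (a.length : Int) = (a.countP (fun y => decide (y < x)) : Int) := by
  refine pvBisect_run a x hs a.length 0 (a.length : Int) (by omega) le_rfl
    (by omega) le_rfl ?_ ?_
  · intro i hi _; omega
  · intro i hi h; omega

theorem enum_append {α : Type} (xs ys : List α) (s : Int) :
    PySem.List.enumerate (xs ++ ys) s
      = PySem.List.enumerate xs s ++ PySem.List.enumerate ys (s + (xs.length : Int)) := by
  induction xs generalizing s with
  | nil => simp
  | cons x xs ih =>
    rw [List.cons_append, PySem.List.enumerate_cons, PySem.List.enumerate_cons, ih,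
      List.length_cons]
    rw [show s + ((xs.length + 1 : Nat) : Int) = s + 1 + (xs.length : Int) by push_cast; ring]
    rfl

theorem enum_map_range (g : Nat → Int) (m : Nat) (s : Int) :
    PySem.List.enumerate ((List.range m).map g) s
      = (List.range m).map (fun t : Nat => (s + (t : Int), g t)) := by
  induction m generalizing s with
  | zero => rfl
  | succ m ih =>
    rw [List.range_succ, List.map_append, List.map_append, enum_append, ih]
    all_goals simp

-- the static index: value -> ascending list of positions carrying that value
theorem pos_getD (g : Nat → Int) (m : Nat) (v : Int) :
    ((PySem.List.enumerate ((List.range m).map g) 0).foldl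
        (fun acc p => acc.modify p.2 [] (· ++ [p.1]))
        (PySem.Dict.empty : PySem.Dict Int (List Int))).getD v []
      = ((List.range m).filter (fun t => g t == v)).map (fun t : Nat => (t : Int)) := by
  rw [enum_map_range]
  rw [show ((List.range m).map (fun t : Nat => ((0 : Int) + (t : Int), g t)))
        = ((List.range m).map (fun t : Nat => (g t, (t : Int)))).map
            (fun q : Int × Int => (q.2, q.1)) by
      rw [List.map_map]; apply List.map_congr_left; intro t _; simp]
  rw [List.foldl_map]
  rw [show (fun (acc : PySem.Dict Int (List Int)) (x : Int × Int) =>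
        acc.modify (x.2, x.1).2 [] (· ++ [(x.2, x.1).1]))
      = (fun acc x => acc.modify x.1 [] (· ++ [x.2])) from rfl]
  rw [PySem.Dict.getD_foldl_modify_append]
  rw [PySem.Dict.getD_empty, List.nil_append, List.filter_map, List.map_map]
  rfl

theorem pos_sorted (g : Nat → Int) (m : Nat) (v : Int) :
    (((List.range m).filter (fun t => g t == v)).map (fun t : Nat => (t : Int))).Pairwise
      (· ≤ ·) := by
  rw [List.pairwise_map]
  exact ((List.pairwise_lt_range).filter _).imp (fun h => by exact_mod_cast le_of_lt (by exact_mod_cast h))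

theorem countP_range_lt (q : Nat → Bool) (m j : Nat) (h : j ≤ m) :
    (List.range m).countP (fun t => decide (t < j) && q t) = (List.range j).countP q := by
  rw [show m = j + (m - j) by omega, List.range_add, List.countP_append, List.countP_map]
  have h2 : (List.range (m - j)).countP
      ((fun t => decide (t < j) && q t) ∘ (fun x => j + x)) = 0 := by
    rw [List.countP_eq_zero]
    intro t _
    have hnot : ¬ (j + t < j) := by omega
    simp [hnot]
  rw [h2, Nat.add_zero]
  apply List.countP_congr
  intro t ht
  rw [List.mem_range] at ht
  simp [ht]

-- count of positions below j in the index list of value v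
theorem pos_count_lt (g : Nat → Int) (m : Nat) (v : Int) (j : Nat) (hj : j ≤ m) :
    (((List.range m).filter (fun t => g t == v)).map (fun t : Nat => (t : Int))).countP
        (fun y => decide (y < (j : Int)))
      = (List.range j).countP (fun t => g t == v) := by
  rw [List.countP_map, List.countP_filter]
  rw [show ((fun y : Int => decide (y < (j : Int))) ∘ fun t : Nat => (t : Int))
      = (fun t : Nat => decide (t < j)) by funext t; simp]
  exact countP_range_lt _ m j hj

theorem pos_length (g : Nat → Int) (m : Nat) (v : Int) :
    (((List.range m).filter (fun t => g t == v)).map (fun t : Nat => (t : Int))).length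
      = (List.range m).countP (fun t => g t == v) := by
  rw [List.length_map]
  exact List.countP_eq_length_filter.symm

theorem countP_beq_eq_pvCnt (nums : List Int) (j : Nat) (v : Int) :
    ((List.range j).countP (fun t => pvD nums (1 + t) == v) : Int) = pvCnt nums 1 (j + 1) v := by
  unfold pvCnt
  rw [show j + 1 - 1 = j by omega]
  congr 1

theorem b_eq_res (nums : List Int) (k : Int) :
    count_max_partitions_alt nums k = pvRes nums k := by
  unfold count_max_partitions_alt
  simp only [ps_eq, diffs_eq]
  rw [PySem.List.pyRange_zero_nat, List.foldl_map]
  have hposv : ∀ v, ((PySem.List.enumerate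
          ((List.range (nums.length - 1)).map (fun t : Nat => pvD nums (1 + t))) 0).foldl
        (fun acc p => acc.modify p.2 [] (· ++ [p.1]))
        (PySem.Dict.empty : PySem.Dict Int (List Int))).getD v []
      = ((List.range (nums.length - 1)).filter
          (fun t => pvD nums (1 + t) == v)).map (fun t : Nat => (t : Int)) :=
    fun v => pos_getD (fun t : Nat => pvD nums (1 + t)) (nums.length - 1) v
  have hcnt_full : ∀ v, (((List.range (nums.length - 1)).countP
        (fun t => pvD nums (1 + t) == v)) : Int) = pvCnt nums 1 nums.length v := by
    intro v
    unfold pvCnt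
    congr 1
  have hbest : ((((PySem.List.enumerate
          ((List.range (nums.length - 1)).map (fun t : Nat => pvD nums (1 + t))) 0).foldl
        (fun acc p => acc.modify p.2 [] (· ++ [p.1]))
        (PySem.Dict.empty : PySem.Dict Int (List Int))).getD 0 []).length : Int)
      = pvCnt nums 1 nums.length 0 := by
    rw [hposv 0, pos_length, hcnt_full]
  rw [hbest]
  unfold pvRes
  apply PySem.List.foldl_congr_mem
  intro acc j hj
  rw [List.mem_range] at hj
  congr 1
  rw [PySem.List.pyGetD_natCast]
  have hwj : ∀ v, (((((List.range (nums.length - 1)).filter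
          (fun t => pvD nums (1 + t) == v)).map (fun t : Nat => (t : Int))).length : Int)
        - pvBisect (((List.range (nums.length - 1)).filter
            (fun t => pvD nums (1 + t) == v)).map (fun t : Nat => (t : Int)))
            (j : Int) 0
            ((((List.range (nums.length - 1)).filter
              (fun t => pvD nums (1 + t) == v)).map (fun t : Nat => (t : Int))).length : Int))
      = pvCnt nums (j + 1) nums.length v := by
    intro v
    rw [pvBisect_spec _ _ (pos_sorted (fun t : Nat => pvD nums (1 + t)) (nums.length - 1) v),
      pos_count_lt (fun t : Nat => pvD nums (1 + t)) (nums.length - 1) v j (by omega),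
      pos_length]
    have hsplit := pvCnt_split nums (show 1 ≤ j + 1 by omega)
      (show j + 1 ≤ nums.length by omega) v
    rw [← hcnt_full v, ← countP_beq_eq_pvCnt nums j v] at hsplit
    omega
  have hlj : ∀ v, pvBisect (((List.range (nums.length - 1)).filter
          (fun t => pvD nums (1 + t) == v)).map (fun t : Nat => (t : Int)))
        (j : Int) 0
        ((((List.range (nums.length - 1)).filter
          (fun t => pvD nums (1 + t) == v)).map (fun t : Nat => (t : Int))).length : Int)
      = pvCnt nums 1 (j + 1) v := by
    intro v
    rw [pvBisect_spec _ _ (pos_sorted (fun t : Nat => pvD nums (1 + t)) (nums.length - 1) v),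
      pos_count_lt (fun t : Nat => pvD nums (1 + t)) (nums.length - 1) v j (by omega)]
    exact countP_beq_eq_pvCnt nums j v
  rw [hposv (nums.getD j 0 - k), hposv (k - nums.getD j 0),
    hwj (nums.getD j 0 - k), hlj (k - nums.getD j 0)]
  rfl

def pvBump (d : PySem.Dict Int Int) (x : Int) : PySem.Dict Int Int :=
  let d' := if d.contains x then d else d.insert x 0
  d'.insert x (d'.getD x 0 + 1)

theorem bump_getD (d : PySem.Dict Int Int) (x v : Int) :
    (pvBump d x).getD v 0 = d.getD v 0 + (if v = x then 1 else 0) := by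
  unfold pvBump
  by_cases hc : d.contains x
  · simp only [hc, if_true, PySem.Dict.getD_insert]
    split_ifs with h <;> simp [h]
  · simp only [hc, if_false, Bool.false_eq_true, PySem.Dict.getD_insert]
    rw [PySem.Dict.getD_of_not_contains d 0 (by simpa using hc)]
    split_ifs with h
    · subst h; rw [PySem.Dict.getD_of_not_contains d 0 (by simpa using hc)]
    · simp

theorem bump_contains (d : PySem.Dict Int Int) (x v : Int) :
    (pvBump d x).contains v = (v == x || d.contains v) := by
  unfold pvBump
  by_cases hc : d.contains x
  · simp [hc, PySem.Dict.contains_insert]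
  · simp [hc, PySem.Dict.contains_insert]

-- pvCnt basics
def pvA1st (nums : List Int) (m : Nat) : PySem.Dict Int Int × Int × Int :=
  (PySem.List.pyRange 1 (1 + (m : Int)) 1).foldl (pvAStep1 nums nums.sum) (PySem.Dict.empty, 0, 0)

theorem pvA1st_succ (nums : List Int) (m : Nat) :
    pvA1st nums (m + 1) = pvAStep1 nums nums.sum (pvA1st nums m) (1 + (m : Int)) := by
  unfold pvA1st
  rw [show (1 + ((m + 1 : Nat) : Int)) = (1 + (m : Int)) + 1 by push_cast; ring]
  rw [PySem.List.pyRange_one_succ_right (by omega), List.foldl_append]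
  rfl

theorem loopA1 (nums : List Int) (m : Nat) (hm : m + 1 ≤ nums.length) :
    (pvA1st nums m).2.2 = pvS nums m ∧
    (pvA1st nums m).2.1 = pvCnt nums 1 (m + 1) 0 ∧
    (∀ v, (pvA1st nums m).1.getD v 0 = pvCnt nums 1 (m + 1) v) ∧
    (∀ v, pvCnt nums 1 (m + 1) v ≠ 0 → (pvA1st nums m).1.contains v = true) := by
  induction m with
  | zero =>
    have : pvA1st nums 0 = (PySem.Dict.empty, 0, 0) := by
      unfold pvA1st
      rw [show ((1 : Int) + ((0 : Nat) : Int)) = 1 by norm_num, PySem.List.pyRange_one_eq_nil le_rfl]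
      rfl
    rw [this]
    refine ⟨rfl, ?_, ?_, ?_⟩
    · rw [pvCnt_empty nums le_rfl]
    · intro v; rw [pvCnt_empty nums le_rfl]; simp [PySem.Dict.getD_empty]
    · intro v hv; exact absurd (pvCnt_empty nums le_rfl v) hv
  | succ m ih =>
    obtain ⟨hpre, hmax, hgetD, hcont⟩ := ih (by omega)
    rw [pvA1st_succ]
    unfold pvAStep1
    have hidx : ((1 : Int) + (m : Int)) - 1 = ((m : Nat) : Int) := by ring
    have hget : PySem.List.pyGetD nums ((1 + (m : Int)) - 1) 0 = nums.getD m 0 := by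
      rw [hidx, PySem.List.pyGetD_natCast]
    have hpre' : (pvA1st nums m).2.2 + PySem.List.pyGetD nums ((1 + (m : Int)) - 1) 0
        = pvS nums (m + 1) := by
      rw [hget, hpre, pvS_succ nums (by omega)]
    have hdiff : pvS nums (m + 1) - (nums.sum - pvS nums (m + 1)) = pvD nums (m + 1) := by
      unfold pvD; ring
    refine ⟨?_, ?_, ?_, ?_⟩
    · simpa using hpre'
    · show (if _ = _ then _ + 1 else _) = _
      rw [hpre', hmax,
        show pvCnt nums 1 (m + 1 + 1) 0
            = pvCnt nums 1 (m + 1) 0 + (if pvD nums (m + 1) = 0 then 1 else 0) from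
          pvCnt_succ nums (by omega) 0]
      by_cases h0 : pvD nums (m + 1) = 0
      · rw [if_pos (by unfold pvD at h0; omega), if_pos h0]
      · rw [if_neg (by unfold pvD at h0; omega), if_neg h0, add_zero]
    · intro v
      show (pvBump (pvA1st nums m).1 _).getD v 0 = _
      rw [bump_getD, hgetD, hpre', hdiff,
        show pvCnt nums 1 (m + 1 + 1) v
            = pvCnt nums 1 (m + 1) v + (if pvD nums (m + 1) = v then 1 else 0) from
          pvCnt_succ nums (by omega) v]
      by_cases h : v = pvD nums (m + 1)
      · rw [if_pos h, if_pos h.symm]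
      · rw [if_neg h, if_neg (fun hh => h hh.symm)]
    · intro v hv
      show (pvBump (pvA1st nums m).1 _).contains v = true
      rw [bump_contains, hpre', hdiff]
      rw [show pvCnt nums 1 (m + 1 + 1) v
            = pvCnt nums 1 (m + 1) v + (if pvD nums (m + 1) = v then 1 else 0) from
          pvCnt_succ nums (by omega) v] at hv
      by_cases h : pvD nums (m + 1) = v
      · simp [h]
      · rw [if_neg h, add_zero] at hv
        simp [hcont v hv]
def pvA2st (nums : List Int) (k : Int) (right0 : PySem.Dict Int Int) (maxw0 : Int) (j : Nat) :
    PySem.Dict Int Int × PySem.Dict Int Int × Int × Int :=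
  (PySem.List.enumerate (nums.take j) 0).foldl (pvAStep2 k nums.sum (nums.length : Int))
    (PySem.Dict.empty, right0, maxw0, 0)

theorem pvA2st_succ (nums : List Int) (k : Int) (right0 : PySem.Dict Int Int) (maxw0 : Int)
    (j : Nat) (hj : j < nums.length) :
    pvA2st nums k right0 maxw0 (j + 1)
      = pvAStep2 k nums.sum (nums.length : Int) (pvA2st nums k right0 maxw0 j)
          (((j : Nat) : Int), nums.getD j 0) := by
  unfold pvA2st
  rw [List.take_add_one, List.getElem?_eq_getElem hj]
  rw [show ((some nums[j]).toList : List Int) = [nums[j]] from rfl]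
  rw [enum_append, List.foldl_append]
  simp only [List.length_take, PySem.List.enumerate_cons]
  rw [show min j nums.length = j by omega]
  simp only [zero_add, List.foldl_cons]
  rw [List.getD_eq_getElem nums 0 hj]
  rfl
theorem loopA2 (nums : List Int) (k : Int) (right0 : PySem.Dict Int Int) (maxw0 : Int)
    (hr : ∀ v, right0.getD v 0 = pvCnt nums 1 nums.length v)
    (j : Nat) (hj : j ≤ nums.length) :
    (pvA2st nums k right0 maxw0 j).2.2.2 = pvS nums j ∧
    (pvA2st nums k right0 maxw0 j).2.2.1
      = (List.range j).foldl (fun acc t => max acc (pvWays nums k t)) maxw0 ∧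
    (∀ v, (pvA2st nums k right0 maxw0 j).1.getD v 0 = pvCnt nums 1 (j + 1) v) ∧
    (∀ v, (pvA2st nums k right0 maxw0 j).2.1.contains v = right0.contains v) ∧
    (j < nums.length →
      ∀ v, (pvA2st nums k right0 maxw0 j).2.1.getD v 0 = pvCnt nums (j + 1) nums.length v) := by
  induction j with
  | zero =>
    have h0 : pvA2st nums k right0 maxw0 0 = (PySem.Dict.empty, right0, maxw0, 0) := by
      unfold pvA2st; rfl
    rw [h0]
    refine ⟨rfl, rfl, ?_, fun v => rfl, ?_⟩
    · intro v
      rw [pvCnt_empty nums le_rfl]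
      simp [PySem.Dict.getD_empty]
    · intro _ v
      exact hr v
  | succ j ih =>
    obtain ⟨hpre, hmax, hleft, hrcont, hrgetD⟩ := ih (by omega)
    have hjlt : j < nums.length := by omega
    rw [pvA2st_succ nums k right0 maxw0 j hjlt]
    unfold pvAStep2
    simp only []
    have hpre' : (pvA2st nums k right0 maxw0 j).2.2.2 + nums.getD j 0 = pvS nums (j + 1) := by
      rw [hpre, pvS_succ nums hjlt]
    have hdiff : 2 * pvS nums (j + 1) - nums.sum = pvD nums (j + 1) := rfl
    -- the ways read equals pvWays j
    have hways :
        (if ((j : Nat) : Int) < (nums.length : Int) - 1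
            then (pvA2st nums k right0 maxw0 j).2.1.getD (nums.getD j 0 - k) 0 else 0)
          + (if 0 < ((j : Nat) : Int)
              then (pvA2st nums k right0 maxw0 j).1.getD (k - nums.getD j 0) 0 else 0)
          = pvWays nums k j := by
      unfold pvWays
      congr 1
      · by_cases h : ((j : Nat) : Int) < (nums.length : Int) - 1
        · rw [if_pos h, hrgetD hjlt]
        · rw [if_neg h, pvCnt_empty nums (by omega)]
      · by_cases h : (0 : Int) < ((j : Nat) : Int)
        · rw [if_pos h, hleft]
        · rw [if_neg h, show j = 0 by omega, pvCnt_empty nums le_rfl]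
    refine ⟨?_, ?_, ?_, ?_, ?_⟩
    · exact hpre'
    · show (if _ < _ then _ else _) = _
      rw [hways, hmax, List.range_succ, List.foldl_append, List.foldl_cons, List.foldl_nil]
      by_cases h : (List.range j).foldl (fun acc t => max acc (pvWays nums k t)) maxw0 < pvWays nums k j
      · rw [if_pos h]; omega
      · rw [if_neg h]; omega
    · intro v
      show (pvBump (pvA2st nums k right0 maxw0 j).1 _).getD v 0 = _
      rw [bump_getD, hleft, hpre', hdiff,
        show pvCnt nums 1 (j + 1 + 1) v
            = pvCnt nums 1 (j + 1) v + (if pvD nums (j + 1) = v then 1 else 0) from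
          pvCnt_succ nums (by omega) v]
      by_cases h : v = pvD nums (j + 1)
      · rw [if_pos h, if_pos h.symm]
      · rw [if_neg h, if_neg (fun hh => h hh.symm)]
    · intro v
      rw [hpre', hdiff]
      by_cases h : (pvA2st nums k right0 maxw0 j).2.1.contains (pvD nums (j + 1)) = true
      · rw [if_pos h]
        rw [PySem.Dict.contains_insert]
        by_cases hv : v = pvD nums (j + 1)
        · subst hv
          simp only [BEq.rfl, Bool.true_or]
          exact ((hrcont _).symm.trans h).symm
        · have : (v == pvD nums (j + 1)) = false := by simp [hv]
          rw [this, Bool.false_or, hrcont v]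
      · rw [if_neg h, hrcont v]
    · intro hlt v
      rw [hpre', hdiff]
      have hj2 : j + 1 + 1 ≤ nums.length := by omega
      have hsp : ∀ w, pvCnt nums (j + 1) nums.length w
          = (if pvD nums (j + 1) = w then 1 else 0) + pvCnt nums (j + 1 + 1) nums.length w := by
        intro w
        rw [pvCnt_split nums (Nat.le_succ (j + 1)) hj2 w]
        congr 1
        rw [pvCnt_succ nums le_rfl w, pvCnt_empty nums le_rfl w, zero_add]
      have hge : (pvA2st nums k right0 maxw0 j).2.1.getD (pvD nums (j + 1)) 0 ≠ 0 := by
        rw [hrgetD hjlt, hsp (pvD nums (j + 1)), if_pos rfl]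
        have := pvCnt_nonneg nums (j + 1 + 1) nums.length (pvD nums (j + 1))
        omega
      have hcon : (pvA2st nums k right0 maxw0 j).2.1.contains (pvD nums (j + 1)) = true := by
        by_contra hfalse
        exact hge (PySem.Dict.getD_of_not_contains _ 0 (by simpa using hfalse))
      rw [if_pos hcon, PySem.Dict.getD_insert]
      by_cases hv : v = pvD nums (j + 1)
      · rw [if_pos hv, hrgetD hjlt, hv, hsp (pvD nums (j + 1)), if_pos rfl]
        ring
      · rw [if_neg hv, hrgetD hjlt, hsp v, if_neg (fun hh => hv hh.symm), zero_add]
theorem a_eq_res (nums : List Int) (k : Int) :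
    count_max_partitions nums k = pvRes nums k := by
  rcases Nat.eq_zero_or_pos nums.length with h0 | hpos
  · rw [List.length_eq_zero_iff] at h0
    subst h0
    rfl
  · unfold count_max_partitions
    have hcast : ((nums.length : Nat) : Int) = 1 + ((nums.length - 1 : Nat) : Int) := by
      push_cast [Nat.cast_sub hpos]; ring
    have hA1 : (PySem.List.pyRange 1 (nums.length : Int) 1).foldl
        (pvAStep1 nums nums.sum) (PySem.Dict.empty, 0, 0) = pvA1st nums (nums.length - 1) := by
      unfold pvA1st; rw [hcast]
    obtain ⟨_, hmax1, hgetD1, _⟩ := loopA1 nums (nums.length - 1) (by omega)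
    have hm1 : nums.length - 1 + 1 = nums.length := by omega
    rw [hm1] at hmax1 hgetD1
    have hA2 : PySem.List.enumerate nums 0
        = PySem.List.enumerate (nums.take nums.length) 0 := by
      rw [List.take_length]
    simp only [hA1, hA2]
    obtain ⟨_, hmax2, _, _, _⟩ :=
      loopA2 nums k (pvA1st nums (nums.length - 1)).1 (pvA1st nums (nums.length - 1)).2.1
        hgetD1 nums.length le_rfl
    unfold pvA2st at hmax2
    rw [hmax2, hmax1]
    rfl

-- ===== VERDICT (by name: the statement is the Claim_ definition above) =====
theorem count_max_partitions_spec : Claim_equal_count_max_partitions := by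
  intro nums k _
  show _ = _
  rw [a_eq_res, b_eq_res]
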